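-- pv_equiv track=rewrite | github.com/casadoj/PyTorch-Book-FIles | Chapter08/generate_text.py | create_word_dictionary
-- ===== SOURCE A (Python) =====
-- def create_word_dictionary(word_list):
--     # Create an empty dictionary
--     word_dict = {}
--     word_dict["UNK"] = 0
--     # Counter for unique values
--     counter = 1
--     # Iterate through the list and assign numbers to unique words
--     for word in word_list:
--         if word not in word_dict:
--             word_dict[word] = counter
--             counter += 1
--
--     return word_dict
-- ===== SOURCE B (Python) =====
-- def create_word_dictionary(word_list):
--     # Sort-based: order the distinct words (minus "UNK", which keeps index 0) by
--     # their first position in word_list, then number the sorted words from 1.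
--     # First positions come from a reversed-enumerate comprehension: earlier pairs
--     # are written last, so the first occurrence index wins.
--     first = {w: i for i, w in reversed(list(enumerate(word_list)))}
--     words = sorted(set(word_list) - {"UNK"}, key=first.__getitem__)
--     word_dict = {"UNK": 0}
--     word_dict.update((w, i) for i, w in enumerate(words, 1))
--     return word_dict
-- ===== Notes on version B (the rewrite author's own statement) =====
-- stated objective: alternative
-- what changed: Replaces A's single membership-guarded accumulation loop (dict + running counter) with a sort-based algorithm: build a first-position table by a reversed-enumerate dict comprehension, sort the distinct-word set minus 'UNK' by that key (injective on distinct words, so the order is fully determined), and number the sorted words from 1.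
import Mathlib
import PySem

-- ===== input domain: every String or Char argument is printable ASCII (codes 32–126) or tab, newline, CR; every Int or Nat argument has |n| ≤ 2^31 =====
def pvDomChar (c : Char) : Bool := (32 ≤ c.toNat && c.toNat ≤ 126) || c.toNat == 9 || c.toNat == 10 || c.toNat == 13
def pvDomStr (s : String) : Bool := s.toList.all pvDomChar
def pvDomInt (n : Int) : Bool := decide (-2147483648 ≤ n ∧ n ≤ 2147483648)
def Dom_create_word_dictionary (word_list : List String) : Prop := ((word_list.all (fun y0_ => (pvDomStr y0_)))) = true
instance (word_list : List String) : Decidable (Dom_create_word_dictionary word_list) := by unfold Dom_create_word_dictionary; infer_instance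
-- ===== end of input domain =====

-- B is a sort-based alternative: distinct words (minus "UNK") ordered by sorting on their
-- first position in word_list, then numbered from 1 — instead of A's membership-guarded loop.

-- ===== PORT A =====
def create_word_dictionary (word_list : List String) : List (String × Int) :=
  let word_dict : PySem.Dict String Int := (PySem.Dict.empty).insert "UNK" 0
  let st := word_list.foldl
    (fun (s : PySem.Dict String Int × Int) word =>
      if s.1.contains word then s else (s.1.insert word s.2, s.2 + 1))
    (word_dict, 1)
  st.1.items

-- ===== PORT B =====
-- The dict comprehension over reversed(list(enumerate(word_list))) is a fold of inserts
-- over that reversed pair list. The sort key first[w] is injective on the distinct words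
-- (every element of the set occurs in word_list, so no KeyError and no ties): the sort
-- order is fully determined and porting through the Set's list is exact; the key is
-- ported as get?/getD, exact since every looked-up word is a key of `first`.
def create_word_dictionary_alt (word_list : List String) : List (String × Int) :=
  let first : PySem.Dict String Int :=
    ((PySem.List.enumerate word_list 0).reverse).foldl
      (fun (d : PySem.Dict String Int) p => d.insert p.2 p.1) PySem.Dict.empty
  let words := PySem.List.sorted
    (PySem.Set.diff (PySem.Set.ofList word_list) ["UNK"])
    (fun w => (first.get? w).getD 0) false
  let word_dict : PySem.Dict String Int := (PySem.Dict.empty).insert "UNK" 0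
  ((PySem.List.enumerate words 1).foldl
    (fun (d : PySem.Dict String Int) p => d.insert p.2 p.1) word_dict).items

-- ===== PRECONDITION & SPEC =====
def Spec_create_word_dictionary (word_list : List String) (out : List (String × Int)) : Prop := out = create_word_dictionary_alt word_list
instance (word_list : List String) (out : List (String × Int)) : Decidable (Spec_create_word_dictionary word_list out) := by unfold Spec_create_word_dictionary; infer_instance

-- ===== CLAIM (what is proved, stated in full; the proofs are below) =====
def Claim_equal_create_word_dictionary : Prop := ∀ (word_list : List String), Dom_create_word_dictionary word_list → Spec_create_word_dictionary word_list (create_word_dictionary word_list)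

-- ===== LEMMAS AND PROOFS =====

-- Folding Set.add from any starting set appends exactly the part of the dedup fresh to it.
lemma foldl_add_from (xs : List String) : ∀ (s : List String),
    List.foldl PySem.Set.add s xs
      = s ++ (List.foldl PySem.Set.add ([] : List String) xs).filter (fun y => !s.contains y) := by
  induction xs with
  | nil => intro s; simp
  | cons x xs ih =>
    intro s
    simp only [List.foldl_cons]
    rw [ih (PySem.Set.add s x), ih (PySem.Set.add ([] : List String) x)]
    have hx0 : PySem.Set.add ([] : List String) x = [x] := by
      simp [PySem.Set.add, PySem.Set.contains]
    rw [hx0]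
    by_cases h : x ∈ s
    · have hadd : PySem.Set.add s x = s := by
        simp [PySem.Set.add, PySem.Set.contains, h]
      rw [hadd]
      simp only [List.filter_append, List.filter_filter]
      have hx : ([x] : List String).filter (fun y => !s.contains y) = [] := by
        simp [List.contains_eq_mem, h]
      rw [hx, List.nil_append]
      congr 1
      apply List.filter_congr
      intro y _
      by_cases hy : y = x
      · subst hy; simp [List.contains_eq_mem, h]
      · simp [List.contains_eq_mem, hy]
    · have hadd : PySem.Set.add s x = s ++ [x] := by
        simp [PySem.Set.add, PySem.Set.contains, h]
      rw [hadd]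
      simp only [List.filter_append, List.filter_filter]
      have hx : ([x] : List String).filter (fun y => !s.contains y) = [x] := by
        simp [List.contains_eq_mem, h]
      rw [hx, List.append_assoc]
      congr 2
      apply List.filter_congr
      intro y _
      by_cases hy : y = x
      · subst hy; simp [List.contains_eq_mem, h]
      · simp [List.contains_eq_mem, hy]

-- dict.fromkeys on a cons: head first, then the dedup of the tail without the head.
lemma dedup_cons (x : String) (xs : List String) :
    PySem.List.dedup (x :: xs) = x :: (PySem.List.dedup xs).filter (fun y => !(y == x)) := by
  simp only [PySem.List.dedup, PySem.Set.ofList, List.foldl_cons]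
  have hx0 : PySem.Set.add PySem.Set.empty x = [x] := by
    simp [PySem.Set.add, PySem.Set.contains, PySem.Set.empty]
  rw [hx0, foldl_add_from xs [x]]
  simp only [List.singleton_append]
  congr 1
  apply List.filter_congr
  intro y _
  by_cases hy : y = x
  · subst hy; simp [List.contains_eq_mem]
  · simp [List.contains_eq_mem, hy]

-- A's loop, from an arbitrary dict/counter state: appends the fresh part of the dedup, numbered from c.
lemma foldA_items (ws : List String) : ∀ (d : PySem.Dict String Int) (c : Int),
    (ws.foldl (fun (s : PySem.Dict String Int × Int) word =>
        if s.1.contains word then s else (s.1.insert word s.2, s.2 + 1)) (d, c)).1.items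
      = d.items ++ (PySem.List.enumerate
          ((PySem.List.dedup ws).filter (fun w => !d.contains w)) c).map (fun p => (p.2, p.1)) := by
  induction ws with
  | nil => intro d c; simp [PySem.List.dedup, PySem.Set.ofList]
  | cons w ws ih =>
    intro d c
    simp only [List.foldl_cons, dedup_cons, List.filter_cons, List.filter_filter]
    by_cases h : d.contains w = true
    · rw [if_pos h]
      have hw : (!d.contains w) = false := by simp [h]
      rw [hw]
      simp only [Bool.false_eq_true, if_false, ih d c]
      congr 3
      apply List.filter_congr
      intro y _
      by_cases hy : y = w
      · subst hy; simp [h]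
      · simp [hy]
    · have h' : d.contains w = false := by simpa using h
      rw [if_neg h]
      have hw : (!d.contains w) = true := by simp [h']
      rw [hw]
      simp only [if_true, ih (d.insert w c) (c + 1)]
      rw [PySem.Dict.items_insert_of_not_contains d c h']
      simp only [PySem.List.enumerate_cons, List.map_cons, List.append_assoc,
        List.singleton_append]
      have hfe : List.filter (fun y => !(d.insert w c).contains y) (PySem.List.dedup ws)
          = List.filter (fun a => !d.contains a && !(a == w)) (PySem.List.dedup ws) := by
        apply List.filter_congr
        intro y _
        by_cases hy : y = w
        · subst hy; simp
        · simp [PySem.Dict.contains_insert, Bool.and_comm]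
      rw [hfe]

-- The dedup of a list is strictly increasing in the first-occurrence index.
lemma pairwise_idx_dedup (l : List String) :
    (PySem.List.dedup l).Pairwise
      (fun a b => (PySem.List.index? l a).getD 0 < (PySem.List.index? l b).getD 0) := by
  induction l with
  | nil => simp [PySem.List.dedup, PySem.Set.ofList]
  | cons x xs ih =>
    rw [dedup_cons]
    constructor
    · intro b hb
      have hbne : b ≠ x := by
        have := List.of_mem_filter hb; simpa using this
      have hbmem : b ∈ xs := by
        have := List.mem_of_mem_filter hb
        rwa [PySem.List.mem_dedup] at this
      obtain ⟨k, hk⟩ := Option.isSome_iff_exists.mp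
        ((PySem.List.index?_isSome_iff xs b).mpr hbmem)
      rw [PySem.List.index?_cons_self, PySem.List.index?_cons_of_ne _ (Ne.symm hbne), hk]
      simp
    · refine List.Pairwise.imp_of_mem ?_ ((ih).filter _)
      intro a b ha hb hlt
      have hane : a ≠ x := by have := List.of_mem_filter ha; simpa using this
      have hbne : b ≠ x := by have := List.of_mem_filter hb; simpa using this
      have hamem : a ∈ xs := by
        have := List.mem_of_mem_filter ha; rwa [PySem.List.mem_dedup] at this
      have hbmem : b ∈ xs := by
        have := List.mem_of_mem_filter hb; rwa [PySem.List.mem_dedup] at this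
      obtain ⟨ka, hka⟩ := Option.isSome_iff_exists.mp
        ((PySem.List.index?_isSome_iff xs a).mpr hamem)
      obtain ⟨kb, hkb⟩ := Option.isSome_iff_exists.mp
        ((PySem.List.index?_isSome_iff xs b).mpr hbmem)
      rw [PySem.List.index?_cons_of_ne _ (Ne.symm hane),
          PySem.List.index?_cons_of_ne _ (Ne.symm hbne), hka, hkb]
      rw [hka, hkb] at hlt
      simpa using Nat.add_lt_add_right (by simpa using hlt) 1

-- set(word_list) - {"UNK"} is the ordered dedup with "UNK" filtered out.
lemma diff_unk (wl : List String) :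
    PySem.Set.diff (PySem.Set.ofList wl) ["UNK"]
      = (PySem.List.dedup wl).filter (fun w => !(w == "UNK")) := by
  rw [PySem.List.dedup_eq_ofList]
  simp only [PySem.Set.diff, PySem.Set.contains]
  apply List.filter_congr
  intro y _
  by_cases h : y = "UNK" <;> simp [h]

-- B's first-position dict: inserting the reversed enumerate pairs leaves, for each word
-- in wl, its FIRST index (offset by the enumerate start); untouched keys keep d's value.
lemma first_get (w : String) : ∀ (wl : List String) (s : Int) (d : PySem.Dict String Int),
    (((PySem.List.enumerate wl s).reverse).foldl
        (fun (d : PySem.Dict String Int) p => d.insert p.2 p.1) d).get? w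
      = match PySem.List.index? wl w with
        | some k => some (s + (k : Int))
        | none => d.get? w := by
  intro wl
  induction wl with
  | nil => intro s d; simp [PySem.List.enumerate_nil, PySem.List.index?_eq_idxOf?]
  | cons x xs ih =>
    intro s d
    rw [PySem.List.enumerate_cons, List.reverse_cons, List.foldl_append]
    simp only [List.foldl_cons, List.foldl_nil]
    by_cases hw : w = x
    · subst hw
      rw [PySem.Dict.get?_insert_self, PySem.List.index?_cons_self]
      simp
    · rw [PySem.Dict.get?_insert_of_ne _ _ hw, ih (s + 1) d,
          PySem.List.index?_cons_of_ne _ (Ne.symm hw)]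
      cases PySem.List.index? xs w with
      | none => simp
      | some k =>
        simp only [Option.map_some]
        congr 1
        push_cast
        ring

-- The sort in B is the identity: its input is already strictly increasing in the key.
lemma sorted_words (wl : List String) :
    PySem.List.sorted (PySem.Set.diff (PySem.Set.ofList wl) ["UNK"])
        (fun w => ((((PySem.List.enumerate wl 0).reverse).foldl
            (fun (d : PySem.Dict String Int) p => d.insert p.2 p.1)
            PySem.Dict.empty).get? w).getD 0) false
      = (PySem.List.dedup wl).filter (fun w => !(w == "UNK")) := by
  rw [diff_unk]
  apply PySem.List.sorted_eq_of_perm_of_pairwise_lt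
  all_goals first
    | exact List.Perm.refl _
    | refine List.Pairwise.imp_of_mem ?_ ((pairwise_idx_dedup wl).filter _)
      intro a b ha hb hlt
      have hamem : a ∈ wl := by
        have := List.mem_of_mem_filter ha; rwa [PySem.List.mem_dedup] at this
      have hbmem : b ∈ wl := by
        have := List.mem_of_mem_filter hb; rwa [PySem.List.mem_dedup] at this
      obtain ⟨ka, hka⟩ := Option.isSome_iff_exists.mp
        ((PySem.List.index?_isSome_iff wl a).mpr hamem)
      obtain ⟨kb, hkb⟩ := Option.isSome_iff_exists.mp
        ((PySem.List.index?_isSome_iff wl b).mpr hbmem)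
      simp only [hka, hkb, Option.getD_some] at hlt
      simp only [first_get, hka, hkb, Option.getD_some]
      omega

-- ===== VERDICT (by name: the statement is the Claim_ definition above) =====
theorem create_word_dictionary_spec : Claim_equal_create_word_dictionary := by
  intro word_list _
  unfold Spec_create_word_dictionary create_word_dictionary create_word_dictionary_alt
  dsimp only
  rw [sorted_words]
  set d0 : PySem.Dict String Int := (PySem.Dict.empty).insert "UNK" 0 with hd0
  set distinct := (PySem.List.dedup word_list).filter (fun w => !(w == "UNK")) with hdist
  have hnodup : distinct.Nodup := by
    rw [hdist]
    exact (PySem.List.nodup_dedup word_list).filter _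
  have hfresh : ∀ p ∈ PySem.List.enumerate distinct 1, d0.contains p.2 = false := by
    intro p hp
    have h2 : p.2 ∈ distinct := by
      have := List.mem_map_of_mem (f := fun q : Int × String => q.2) hp
      rwa [PySem.List.map_snd_enumerate] at this
    rw [hdist] at h2
    have h3 := List.of_mem_filter h2
    rw [hd0, PySem.Dict.contains_insert]
    simp only [PySem.Dict.contains_empty, Bool.or_false]
    simpa using h3
  have hkeys : ((PySem.List.enumerate distinct 1).map (fun p : Int × String => p.2)).Nodup := by
    rw [PySem.List.map_snd_enumerate]; exact hnodup
  rw [foldA_items word_list d0 1,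
      PySem.Dict.items_foldl_insert_fresh (PySem.List.enumerate distinct 1)
        (fun p : Int × String => p.2) (fun p : Int × String => p.1) d0 hfresh hkeys]
  congr 3
  rw [hdist]
  apply List.filter_congr
  intro y _
  rw [hd0, PySem.Dict.contains_insert]
  simp [PySem.Dict.contains_empty]
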